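-- pv_equiv track=rewrite | github.com/sinclairr08/baekjoon-online-judge | Failures/18111_time_overflow.py | calc_blocks
-- ===== SOURCE A (Python) =====
-- def calc_blocks(blocks, height):
--     cost = 0
--     req_block = 0
--
--     for block in blocks:
--         D = block - height
--
--         if D > 0:
--             cost += 2 * D
--             req_block -= D
--         elif D < 0:
--             cost -= D
--             req_block -= D
--
--     return cost, req_block
-- ===== SOURCE B (Python) =====
-- def calc_blocks(blocks, height):
--     # Aggregate into a frequency table, then work per distinct height.
--     counts = {}
--     for b in blocks:
--         counts[b] = counts.get(b, 0) + 1
--     cost = 0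
--     req_block = 0
--     for v, c in counts.items():
--         d = v - height
--         if d > 0:
--             cost += 2 * d * c
--         elif d < 0:
--             cost += (-d) * c
--         req_block -= d * c
--     return cost, req_block
-- ===== Notes on version B (the rewrite author's own statement) =====
-- stated objective: alternative
-- what changed: B first builds a frequency table of the block heights and then computes cost and block delta in one pass over the DISTINCT heights weighted by multiplicity, instead of A's per-element accumulator loop
import Mathlib
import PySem

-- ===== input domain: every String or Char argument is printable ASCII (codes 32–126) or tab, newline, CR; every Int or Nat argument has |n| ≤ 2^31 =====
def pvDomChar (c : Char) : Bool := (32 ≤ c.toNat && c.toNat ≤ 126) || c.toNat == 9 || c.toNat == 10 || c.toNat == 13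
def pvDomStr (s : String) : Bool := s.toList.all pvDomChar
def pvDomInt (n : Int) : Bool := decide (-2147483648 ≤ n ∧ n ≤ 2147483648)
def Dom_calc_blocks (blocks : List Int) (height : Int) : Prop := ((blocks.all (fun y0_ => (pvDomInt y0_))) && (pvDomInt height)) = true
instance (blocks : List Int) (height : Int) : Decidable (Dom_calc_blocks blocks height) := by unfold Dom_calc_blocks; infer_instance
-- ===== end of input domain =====

-- B builds a frequency table of the block heights and then works per distinct height, weighted by multiplicity; objective: alternative.

-- ===== PORT A =====
def calc_blocks (blocks : List Int) (height : Int) : Int × Int :=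
  blocks.foldl (fun (s : Int × Int) block =>
    let D := block - height
    if D > 0 then (s.1 + 2 * D, s.2 - D)
    else if D < 0 then (s.1 - D, s.2 - D)
    else s) (0, 0)

-- ===== PORT B =====
-- counts[b] = counts.get(b, 0) + 1 : overwrite in place, append if new key (Python dict semantics)
def pvBump (d : List (Int × Int)) (b : Int) : List (Int × Int) :=
  match d with
  | [] => [(b, 1)]
  | (k, c) :: rest => if k = b then (k, c + 1) :: rest else (k, c) :: pvBump rest b

def calc_blocks_alt (blocks : List Int) (height : Int) : Int × Int :=
  let counts := blocks.foldl pvBump []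
  counts.foldl (fun (s : Int × Int) p =>
    let d := p.1 - height
    let cost := if d > 0 then s.1 + 2 * d * p.2
                else if d < 0 then s.1 + (-d) * p.2
                else s.1
    (cost, s.2 - d * p.2)) (0, 0)

-- ===== PRECONDITION & SPEC =====
def Spec_calc_blocks (blocks : List Int) (height : Int) (out : Int × Int) : Prop := out = calc_blocks_alt blocks height
instance (blocks : List Int) (height : Int) (out : Int × Int) : Decidable (Spec_calc_blocks blocks height out) := by unfold Spec_calc_blocks; infer_instance

-- ===== CLAIM (what is proved, stated in full; the proofs are below) =====
def Claim_equal_calc_blocks : Prop := ∀ (blocks : List Int) (height : Int), Dom_calc_blocks blocks height → Spec_calc_blocks blocks height (calc_blocks blocks height)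

-- ===== LEMMAS AND PROOFS =====

-- weighted sum of g over an association list (frequency table)
def pvW (g : Int → Int) (d : List (Int × Int)) : Int := (d.map (fun p => g p.1 * p.2)).sum

theorem pvW_bump (g : Int → Int) (d : List (Int × Int)) (b : Int) :
    pvW g (pvBump d b) = pvW g d + g b := by
  induction d with
  | nil => simp [pvBump, pvW]
  | cons p rest ih =>
    obtain ⟨k, c⟩ := p
    by_cases h : k = b
    · subst h; simp [pvBump, pvW]; ring
    · simp [pvBump, h, pvW] at ih ⊢; omega

theorem pvW_counter (g : Int → Int) (l : List Int) (d : List (Int × Int)) :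
    pvW g (l.foldl pvBump d) = pvW g d + (l.map g).sum := by
  induction l generalizing d with
  | nil => simp
  | cons b bs ih => simp only [List.foldl_cons, List.map_cons, List.sum_cons, ih, pvW_bump]; ring

-- A's fold in closed form
theorem calc_blocks_foldl (blocks : List Int) (height : Int) (c r : Int) :
    blocks.foldl (fun (s : Int × Int) block =>
      let D := block - height
      if D > 0 then (s.1 + 2 * D, s.2 - D)
      else if D < 0 then (s.1 - D, s.2 - D)
      else s) (c, r)
    = (c + (blocks.map (fun b => if b > height then 2 * (b - height) else height - b)).sum,
       r - (blocks.map (fun b => b - height)).sum) := by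
  induction blocks generalizing c r with
  | nil => simp
  | cons b bs ih =>
    simp only [List.foldl_cons, List.map_cons, List.sum_cons]
    split_ifs with h1 h2 <;> rw [ih, Prod.mk.injEq] <;> constructor <;> omega

-- B's fold over the frequency table in closed form (weighted sums)
theorem alt_foldl (height : Int) (l : List (Int × Int)) (c r : Int) :
    l.foldl (fun (s : Int × Int) p =>
      let d := p.1 - height
      let cost := if d > 0 then s.1 + 2 * d * p.2
                  else if d < 0 then s.1 + (-d) * p.2
                  else s.1
      (cost, s.2 - d * p.2)) (c, r)
    = (c + pvW (fun v => if v > height then 2 * (v - height) else height - v) l,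
       r - pvW (fun v => v - height) l) := by
  induction l generalizing c r with
  | nil => simp [pvW]
  | cons p ps ih =>
    simp only [List.foldl_cons, pvW, List.map_cons, List.sum_cons] at ih ⊢
    rw [ih, Prod.mk.injEq]
    refine ⟨?_, by ring⟩
    rcases lt_trichotomy p.1 height with h | h | h
    · have h1 : ¬ p.1 - height > 0 := by omega
      have h2 : p.1 - height < 0 := by omega
      have h3 : ¬ p.1 > height := by omega
      simp only [if_neg h1, if_pos h2, if_neg h3]; ring
    · have h1 : ¬ p.1 - height > 0 := by omega
      have h2 : ¬ p.1 - height < 0 := by omega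
      have h3 : ¬ p.1 > height := by omega
      simp only [if_neg h1, if_neg h2, if_neg h3]
      rw [h]; ring
    · have h1 : p.1 - height > 0 := by omega
      have h3 : p.1 > height := by omega
      simp only [if_pos h1, if_pos h3]; ring

-- ===== VERDICT (by name: the statement is the Claim_ definition above) =====
theorem calc_blocks_spec : Claim_equal_calc_blocks := by
  intro blocks height _
  unfold Spec_calc_blocks calc_blocks calc_blocks_alt
  rw [calc_blocks_foldl, alt_foldl, pvW_counter, pvW_counter]
  simp [pvW]
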